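-- pv_equiv track=rewrite | github.com/asweigart/programmedpatterns | book/visualpatterns.py | pattern37
-- ===== SOURCE A (Python) =====
-- def pattern37(step):
--     pattern = 'O'
--     i = 2
--     while True:
--         if i > step:
--             break
--         pattern += 'OO'
--         i += 1
--
--         if i > step:
--             break
--         pattern += ''
--         i += 1
--
--         if i > step:
--             break
--         pattern += ''
--         i += 1
--     return pattern
-- ===== SOURCE B (Python) =====
-- def pattern37(step):
--     count = max(0, (step - 2) // 3 + 1)
--     return 'O' + 'OO' * count
-- ===== Notes on version B (the rewrite author's own statement) =====
-- stated objective: faster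
-- what changed: Replaced the three-phase while-loop that appends 'OO' once per block of three steps with a closed-form count ((step-2)//3 + 1, clamped at 0) and a single string multiplication.
import Mathlib
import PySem

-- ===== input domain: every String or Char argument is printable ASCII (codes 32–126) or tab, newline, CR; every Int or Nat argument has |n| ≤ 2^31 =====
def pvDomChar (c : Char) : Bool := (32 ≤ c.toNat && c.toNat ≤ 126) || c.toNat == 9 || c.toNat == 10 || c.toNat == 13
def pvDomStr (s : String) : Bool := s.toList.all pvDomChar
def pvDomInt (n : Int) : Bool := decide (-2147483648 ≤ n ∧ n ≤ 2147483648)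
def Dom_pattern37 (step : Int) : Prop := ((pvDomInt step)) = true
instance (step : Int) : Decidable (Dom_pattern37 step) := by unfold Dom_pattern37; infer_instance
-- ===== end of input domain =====

-- B replaces A's while-loop (which appends 'OO' on the first of every three steps) by a
-- closed-form count and one string multiplication.

-- ===== PORT A =====
-- the 'while True' loop: one call = one pass through the loop body (three checked increments)
def pattern37Loop (step i : Int) (pattern : String) : String :=
  if i > step then pattern
  else
    let pattern := pattern ++ "OO"
    if i + 1 > step then pattern
    else if i + 2 > step then pattern
    else pattern37Loop step (i + 3) pattern
termination_by (step + 1 - i).toNat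
decreasing_by omega

def pattern37 (step : Int) : String := pattern37Loop step 2 "O"

-- ===== PORT B =====
def pattern37_alt (step : Int) : String :=
  let count := max 0 (PySem.Int.floordiv (step - 2) 3 + 1)
  "O" ++ String.ofList (PySem.List.pyRepeat ['O', 'O'] count)

-- ===== PRECONDITION & SPEC =====
def Spec_pattern37 (step : Int) (out : String) : Prop := out = pattern37_alt step
instance (step : Int) (out : String) : Decidable (Spec_pattern37 step out) := by unfold Spec_pattern37; infer_instance

-- ===== CLAIM (what is proved, stated in full; the proofs are below) =====
def Claim_equal_pattern37 : Prop := ∀ (step : Int), Dom_pattern37 step → Spec_pattern37 step (pattern37 step)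

-- ===== LEMMAS AND PROOFS =====

-- number of 'OO' blocks the loop emits starting at position i
def pvCnt (step i : Int) : Nat := if i ≤ step then (step - i).toNat / 3 + 1 else 0

lemma pvLoop_closed (step i : Int) (p : String) :
    pattern37Loop step i p = p ++ String.ofList (List.flatten (List.replicate (pvCnt step i) ['O', 'O'])) := by
  fun_induction pattern37Loop step i p with
  | case1 i p h1 =>
    have : ¬ i ≤ step := by omega
    simp [pvCnt, this]
  | case2 i p h1 h2 =>
    have hc : pvCnt step i = 1 := by unfold pvCnt; split_ifs <;> omega
    rw [hc]
    simp
    rfl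
  | case3 i p h1 h2 h3 =>
    have hc : pvCnt step i = 1 := by unfold pvCnt; split_ifs <;> omega
    rw [hc]
    simp
    rfl
  | case4 i p h1 pat h2 h3 ih =>
    have hc : pvCnt step i = pvCnt step (i + 3) + 1 := by unfold pvCnt; split_ifs <;> omega
    rw [ih, hc, List.replicate_succ, List.flatten_cons]
    show (p ++ "OO") ++ String.ofList (List.replicate (pvCnt step (i + 3)) ['O', 'O']).flatten
        = p ++ String.ofList (['O', 'O'] ++ (List.replicate (pvCnt step (i + 3)) ['O', 'O']).flatten)
    rw [show ("OO" : String) = String.ofList ['O', 'O'] by decide, String.append_assoc]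
    simp
    apply String.toList_inj.mp
    simp

-- ===== VERDICT (by name: the statement is the Claim_ definition above) =====
theorem pattern37_spec : Claim_equal_pattern37 := by
  intro step _
  unfold Spec_pattern37 pattern37 pattern37_alt
  rw [pvLoop_closed]
  have hr : PySem.List.pyRepeat ['O', 'O'] (max 0 (PySem.Int.floordiv (step - 2) 3 + 1))
      = List.flatten (List.replicate ((max 0 (PySem.Int.floordiv (step - 2) 3 + 1)).toNat) ['O', 'O']) := by
    simp [PySem.List.pyRepeat]
  have hcnt : pvCnt step 2 = (max 0 (PySem.Int.floordiv (step - 2) 3 + 1)).toNat := by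
    have hf : PySem.Int.floordiv (step - 2) 3 * 3 + PySem.Int.mod (step - 2) 3 = step - 2 :=
      PySem.Int.floordiv_mul_add_mod _ _
    have hm : 0 ≤ PySem.Int.mod (step - 2) 3 ∧ PySem.Int.mod (step - 2) 3 < 3 := by
      constructor
      · exact PySem.Int.mod_nonneg _ (by norm_num)
      · exact PySem.Int.mod_lt _ (by norm_num)
    unfold pvCnt
    split_ifs <;> omega
  show "O" ++ String.ofList (List.replicate (pvCnt step 2) ['O', 'O']).flatten
      = "O" ++ String.ofList (PySem.List.pyRepeat ['O', 'O'] (max 0 (PySem.Int.floordiv (step - 2) 3 + 1)))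
  rw [hr, hcnt]
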